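-- pv_equiv track=rewrite | github.com/Sander-Kroeze/Programmeren-II | week_9/hw9pr1/wk9ex1.py | inner_cells
-- ===== SOURCE A (Python) =====
-- def createOneRow(width):
--     """ returns one row of zeros of width "width"...
--          You might use this in your createBoard(width, height) function """
--     row = []
--     for col in range(width):
--         row += [0]
--     return row
--
-- def create_board(width, height):
--     """Returns a 2D array with "height" rows and "width" columns."""
--     a = []
--     for row in range(height):
--         a += [createOneRow(width)]  # gebruik de bovenstaande functie zodat ... één rij is!!
--     return a
--
-- def inner_cells(w, h):
--     """
--         Creats a board with only the number 1 in the centre.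
--         On the outside of the board only the number 0.
--     """
--     a = create_board(w, h)
--
--     for row in range(h):
--         for col in range(w):
--             if 0 < row < h - 1 and 0 < col < w - 1:
--                 a[row][col] = 1
--             else:
--                 a[row][col] = 0
--
--     return a
-- ===== SOURCE B (Python) =====
-- def inner_cells(w, h):
--     """Fill-then-mask: build an all-ones board, then zero the border rows and columns."""
--     a = [[1] * w for _ in range(h)]
--     if h > 0:
--         a[0] = [0] * w
--         a[h - 1] = [0] * w
--     if w > 0:
--         for r in range(h):
--             a[r][0] = 0
--             a[r][w - 1] = 0
--     return a
-- ===== Notes on version B (the rewrite author's own statement) =====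
-- stated objective: faster
-- what changed: Replaces A's build-zero-board-then-per-cell-conditional double loop with a fill-then-mask decomposition: build an all-ones board by list repetition, overwrite the first and last rows with zero rows, then zero only the first and last cell of every row.
import Mathlib
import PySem

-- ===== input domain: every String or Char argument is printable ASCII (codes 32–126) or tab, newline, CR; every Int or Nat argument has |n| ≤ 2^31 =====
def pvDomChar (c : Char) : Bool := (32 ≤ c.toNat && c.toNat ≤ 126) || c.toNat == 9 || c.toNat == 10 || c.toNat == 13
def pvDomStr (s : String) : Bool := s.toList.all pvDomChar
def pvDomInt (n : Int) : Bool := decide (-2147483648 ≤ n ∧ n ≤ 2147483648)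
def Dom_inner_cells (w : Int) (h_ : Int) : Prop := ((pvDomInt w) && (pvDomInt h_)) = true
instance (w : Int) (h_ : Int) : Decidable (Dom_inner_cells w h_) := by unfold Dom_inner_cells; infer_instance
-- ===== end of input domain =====

-- B builds an all-ones board and zeroes the border in separate passes instead of A's per-cell conditional (objective: simpler).

-- ===== PORT A =====
def createOneRow (width : Int) : List Int :=
  (PySem.List.pyRange 0 width 1).foldl (fun row _ => row ++ [0]) []

def create_board (width : Int) (height : Int) : List (List Int) :=
  (PySem.List.pyRange 0 height 1).foldl (fun a _ => a ++ [createOneRow width]) []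

def inner_cells (w : Int) (h_ : Int) : List (List Int) :=
  (PySem.List.pyRange 0 h_ 1).foldl (fun a row =>
    (PySem.List.pyRange 0 w 1).foldl (fun a col =>
      let v : Int := if 0 < row ∧ row < h_ - 1 ∧ 0 < col ∧ col < w - 1 then 1 else 0
      a.set row.toNat ((a.getD row.toNat []).set col.toNat v)) a)
    (create_board w h_)

def pvRep (x : Int) (w : Int) : List Int := List.replicate w.toNat x

def inner_cells_alt (w : Int) (h_ : Int) : List (List Int) :=
  let a := (PySem.List.pyRange 0 h_ 1).map (fun _ => pvRep 1 w)
  let a := if 0 < h_ then (a.set 0 (pvRep 0 w)).set (h_ - 1).toNat (pvRep 0 w) else a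
  if 0 < w then
    (PySem.List.pyRange 0 h_ 1).foldl (fun a r =>
      a.set r.toNat (((a.getD r.toNat []).set 0 0).set (w - 1).toNat 0)) a
  else a


-- ===== PRECONDITION & SPEC =====
def Spec_inner_cells (w : Int) (h_ : Int) (out : List (List Int)) : Prop := out = inner_cells_alt w h_
instance (w : Int) (h_ : Int) (out : List (List Int)) : Decidable (Spec_inner_cells w h_ out) := by unfold Spec_inner_cells; infer_instance

-- ===== CLAIM (what is proved, stated in full; the proofs are below) =====
def Claim_equal_inner_cells : Prop := ∀ (w : Int) (h_ : Int), Dom_inner_cells w h_ → Spec_inner_cells w h_ (inner_cells w h_)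

-- ===== LEMMAS AND PROOFS =====
theorem setfold_range {α : Type} (g : ℕ → α → α) (d : α) :
    ∀ (n : ℕ) (l : List α), n ≤ l.length →
      (List.range n).foldl (fun l k => l.set k (g k (l.getD k d))) l
        = (List.range n).map (fun k => g k (l.getD k d)) ++ l.drop n := by
  intro n
  induction n with
  | zero => simp
  | succ n ih =>
    intro l hn
    rw [List.range_succ, List.foldl_append, List.map_append, ih l (by omega)]
    have hmlen : ((List.map (fun k => g k (l.getD k d)) (List.range n))).length = n := by simp
    have hdrop : l.drop n = l[n] :: l.drop (n+1) := List.drop_eq_getElem_cons (by omega)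
    simp only [List.foldl_cons, List.foldl_nil]
    rw [List.set_append_right _ _ (by omega), hmlen]
    have hget : ((List.map (fun k => g k (l.getD k d)) (List.range n) ++ l.drop n).getD n d) = l[n] := by
      rw [List.getD_eq_getElem?_getD, List.getElem?_append_right (by omega), hmlen]
      simp only [Nat.sub_self, hdrop, List.getElem?_cons_zero, Option.getD_some]
    rw [hget, hdrop]
    simp only [List.map_cons, List.map_nil, List.append_assoc, List.cons_append, List.nil_append]
    rw [List.getD_eq_getElem?_getD, List.getElem?_eq_getElem (show n < l.length by omega)]
    simp only [Option.getD_some, Nat.sub_self, List.set_cons_zero]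
    rfl

-- foldl appending a constant element
theorem foldl_append_const {α β : Type} (c : α) :
    ∀ (xs : List β) (init : List α),
      xs.foldl (fun r _ => r ++ [c]) init = init ++ List.replicate xs.length c := by
  intro xs
  induction xs with
  | nil => simp
  | cons x xs ih =>
    intro init
    rw [List.foldl_cons, ih]
    simp [List.replicate_succ]

theorem createOneRow_eq (width : Int) : createOneRow width = List.replicate width.toNat 0 := by
  rw [createOneRow, PySem.List.pyRange_one, foldl_append_const]
  simp

theorem create_board_eq (w h_ : Int) :
    create_board w h_ = List.replicate h_.toNat (List.replicate w.toNat 0) := by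
  rw [create_board, PySem.List.pyRange_one, foldl_append_const]
  simp [createOneRow_eq]

-- folding a row-update at a fixed in-range index factors through the row
theorem foldl_set_same {β : Type} (u : List Int → β → List Int) (i : ℕ) :
    ∀ (cs : List β) (a : List (List Int)), i < a.length →
      cs.foldl (fun a c => a.set i (u (a.getD i []) c)) a
        = a.set i (cs.foldl u (a.getD i [])) := by
  intro cs
  induction cs with
  | nil =>
    intro a hi
    simp only [List.foldl_nil]
    rw [List.getD_eq_getElem?_getD, List.getElem?_eq_getElem hi]
    simp
  | cons c cs ih =>
    intro a hi
    simp only [List.foldl_cons]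
    rw [ih _ (by simpa using hi)]
    have hset : ((a.set i (u (a.getD i []) c)).getD i []) = u (a.getD i []) c := by
      rw [List.getD_eq_getElem?_getD, List.getElem?_set_self (by simpa using hi)]
      rfl
    rw [hset, List.set_set]


theorem setfold_range_const {α : Type} (v : ℕ → α) (d : α) (n : ℕ) (l : List α) (h : n ≤ l.length) :
    (List.range n).foldl (fun l k => l.set k (v k)) l
      = (List.range n).map v ++ l.drop n := by
  have := setfold_range (fun k _ => v k) d n l h
  simpa using this

theorem foldl_inv_congr {α β : Type} (P : α → Prop) (f g : α → β → α)
    (hP : ∀ a b, P a → P (g a b)) :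
    ∀ (cs : List β) (a : α), P a → (∀ a b, P a → b ∈ cs → f a b = g a b) →
      cs.foldl f a = cs.foldl g a := by
  intro cs
  induction cs with
  | nil => intro a _ _; rfl
  | cons c cs ih =>
    intro a ha hfg
    simp only [List.foldl_cons]
    rw [hfg a c ha (by simp), ih _ (hP a c ha) (fun a b hb hm => hfg a b hb (by simp [hm]))]

def cellVal (w h_ : Int) (r c : ℕ) : Int :=
  if 0 < (r:Int) ∧ (r:Int) < h_ - 1 ∧ 0 < (c:Int) ∧ (c:Int) < w - 1 then 1 else 0

theorem inner_cells_eq (w h_ : Int) :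
    inner_cells w h_
      = (List.range h_.toNat).map (fun r => (List.range w.toNat).map (cellVal w h_ r)) := by
  unfold inner_cells
  rw [create_board_eq]
  simp only [PySem.List.pyRange_one, Int.sub_zero, List.foldl_map, zero_add, Int.toNat_natCast]
  refine (foldl_inv_congr (fun a => a.length = h_.toNat) _
      (fun a k => a.set k ((List.range w.toNat).foldl
        (fun l c => l.set c (cellVal w h_ k c)) (a.getD k []))) ?_ _ _ ?_ ?_).trans ?_
  · intro a b ha; simpa using ha
  · simp
  · intro a k ha hk
    exact foldl_set_same (fun l c => l.set c (cellVal w h_ k c)) k _ a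
      (by rw [ha]; exact List.mem_range.mp hk)
  · rw [setfold_range (fun k row => (List.range w.toNat).foldl
        (fun l c => l.set c (cellVal w h_ k c)) row) [] h_.toNat _ (by simp)]
    simp only [List.drop_replicate, Nat.sub_self, List.replicate_zero,
      List.append_nil]
    refine List.map_congr_left ?_
    intro k hk
    have hklt : k < h_.toNat := List.mem_range.mp hk
    rw [List.getD_eq_getElem?_getD, List.getElem?_replicate_of_lt hklt]
    simp only [Option.getD_some]
    rw [setfold_range_const (cellVal w h_ k) 0 w.toNat (List.replicate w.toNat 0) (by simp)]
    simp

theorem ports_eq (w h_ : Int) : inner_cells w h_ = inner_cells_alt w h_ := by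
  rw [inner_cells_eq]
  unfold inner_cells_alt pvRep
  by_cases hh : 0 < h_
  · simp only [if_pos hh, PySem.List.pyRange_one, Int.sub_zero, List.map_map, List.foldl_map,
      zero_add, Int.toNat_natCast]
    simp only [Function.comp_def, List.map_const', List.length_range]
    by_cases hw : 0 < w
    · rw [if_pos hw]
      have hlen : h_.toNat ≤ (((List.replicate h_.toNat (List.replicate w.toNat (1:Int))).set 0
          (List.replicate w.toNat (0:Int))).set (h_ - 1).toNat (List.replicate w.toNat (0:Int))).length := by simp
      have hsf := setfold_range (fun _ row => ((row.set 0 (0:Int)).set (w - 1).toNat 0)) []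
        h_.toNat _ hlen
      beta_reduce at hsf
      rw [hsf]
      rw [List.drop_of_length_le (by simp), List.append_nil]
      refine List.map_congr_left ?_
      intro k hk
      have hklt : k < h_.toNat := List.mem_range.mp hk
      have hget : (((List.replicate h_.toNat (List.replicate w.toNat (1:Int))).set 0
            (List.replicate w.toNat 0)).set (h_ - 1).toNat (List.replicate w.toNat 0)).getD k []
          = if k = (h_ - 1).toNat ∨ k = 0 then List.replicate w.toNat (0:Int)
            else List.replicate w.toNat 1 := by
        rw [List.getD_eq_getElem?_getD]
        by_cases h1 : k = (h_ - 1).toNat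
        · rw [h1, List.getElem?_set_self (by simp; omega)]
          simp
        · rw [List.getElem?_set_ne (fun h => h1 h.symm)]
          by_cases h2 : k = 0
          · rw [h2, List.getElem?_set_self (by simp; omega)]
            simp
          · rw [List.getElem?_set_ne (fun h => h2 h.symm), List.getElem?_replicate_of_lt hklt,
              if_neg (not_or.mpr ⟨h1, h2⟩)]
            rfl
      rw [hget]
      by_cases hb : k = (h_ - 1).toNat ∨ k = 0
      · rw [if_pos hb, List.set_replicate_self, List.set_replicate_self]
        rw [List.map_congr_left (fun c hc => show cellVal w h_ k c = 0 from by
          unfold cellVal; rw [if_neg]; rcases hb with hb|hb <;> omega)]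
        simp [List.map_const']
      · obtain ⟨hb1, hb2⟩ := not_or.mp hb
        rw [if_neg hb]
        refine List.ext_getElem (by simp) ?_
        intro c hc1 hc2
        simp only [List.getElem_map, List.getElem_range, List.getElem_set,
          List.getElem_replicate]
        unfold cellVal
        simp only [List.length_set, List.length_replicate] at hc2
        split_ifs <;> omega
    · have hw0 : w.toNat = 0 := by omega
      simp [if_neg hw, hw0, List.set_replicate_self]
  · have h0 : h_.toNat = 0 := by omega
    simp [h0, PySem.List.pyRange_one_eq_nil (by omega : h_ ≤ 0)]

-- ===== VERDICT (by name: the statement is the Claim_ definition above) =====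
theorem inner_cells_spec : Claim_equal_inner_cells := by
  intro w h_ _
  show inner_cells w h_ = inner_cells_alt w h_
  exact ports_eq w h_
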